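-- pv_equiv track=rewrite | github.com/krmiller678/BetAI | frontend/streamlit_app/views/live_board.py | _group_offers_by_market
-- ===== SOURCE A (Python) =====
-- from typing import Any, Callable, Dict, List        # Precise typing for collections and callables
--
-- def _group_offers_by_market(offers: list[dict[str, Any]]) -> dict[str, list[dict[str, Any]]]:
--     """
--     Group offers by market type: moneyline, spread, total.
--     Unknown / missing markets are grouped under 'other'.
--     """
--     buckets: dict[str, list[dict[str, Any]]] = {
--         "moneyline": [],
--         "spread": [],
--         "total": [],
--         "other": [],
--     }
--
--     for off in offers or []:
--         # Ensure we pass a str, never Optional[str], to satisfy the type checker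
--         market = (off.get("market") or "other")
--         if market not in buckets:        # anything unexpected => 'other'
--             market = "other"
--         buckets[market].append(off)
--
--     return buckets
-- ===== SOURCE B (Python) =====
-- # B: classify once, then build the result as a dict comprehension of four
-- # filtered passes (one per bucket name) instead of one dispatch loop.
-- _NAMES = ("moneyline", "spread", "total", "other")
--
-- def _classify(off):
--     k = off.get("market") or "other"
--     return k if k in _NAMES else "other"
--
-- def _group_offers_by_market(offers):
--     src = offers or []
--     return {name: [off for off in src if _classify(off) == name] for name in _NAMES}
-- ===== Notes on version B (the rewrite author's own statement) =====
-- stated objective: alternative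
-- what changed: Replaces the single mutate-buckets dispatch loop with a classifier plus a dict comprehension that builds each of the four buckets by its own filtered pass over the offers.
import Mathlib
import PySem

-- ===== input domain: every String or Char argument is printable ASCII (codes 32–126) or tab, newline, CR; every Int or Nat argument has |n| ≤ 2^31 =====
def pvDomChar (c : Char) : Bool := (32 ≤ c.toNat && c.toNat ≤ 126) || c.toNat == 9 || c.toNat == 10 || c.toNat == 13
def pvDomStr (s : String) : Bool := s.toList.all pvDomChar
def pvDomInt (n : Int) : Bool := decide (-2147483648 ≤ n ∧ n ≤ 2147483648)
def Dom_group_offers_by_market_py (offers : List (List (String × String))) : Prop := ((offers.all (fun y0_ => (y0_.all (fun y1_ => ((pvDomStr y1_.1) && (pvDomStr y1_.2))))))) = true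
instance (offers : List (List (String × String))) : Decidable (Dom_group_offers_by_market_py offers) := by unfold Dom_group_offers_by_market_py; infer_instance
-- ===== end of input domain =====

-- B builds each bucket by its own filtered pass with a classifier, instead of A's single dispatch loop; same return value.


-- ===== PORT A =====
-- off.get("market"): first match in the association list (exact for Python dict-as-assoc-list); used by both ports for off.get
def pvGetMarket (off : List (String × String)) : Option String :=
  (off.find? (fun kv => kv.1 == "market")).map (·.2)

def group_offers_by_market_py (offers : List (List (String × String))) : List (String × List (List (String × String))) :=
  let buckets : PySem.Dict String (List (List (String × String))) :=
    PySem.Dict.ofList [("moneyline", []), ("spread", []), ("total", []), ("other", [])]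
  let buckets := offers.foldl (fun b off =>
    -- market = (off.get("market") or "other")   ('' and missing are falsy)
    let market : String := match pvGetMarket off with
      | some m => if m = "" then "other" else m
      | none => "other"
    -- if market not in buckets: market = "other"
    let market := if b.contains market then market else "other"
    -- buckets[market].append(off)
    b.modify market [] (fun xs => xs ++ [off])) buckets
  buckets.items

-- ===== PORT B =====
def pvClassify (off : List (String × String)) : String :=
  let k : String := match pvGetMarket off with
    | some m => if m = "" then "other" else m
    | none => "other"
  if k ∈ ["moneyline", "spread", "total", "other"] then k else "other"

def group_offers_by_market_py_alt (offers : List (List (String × String))) : List (String × List (List (String × String))) :=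
  ["moneyline", "spread", "total", "other"].map
    (fun name => (name, offers.filter (fun off => pvClassify off == name)))

-- ===== PRECONDITION & SPEC =====
def Spec_group_offers_by_market_py (offers : List (List (String × String))) (out : List (String × List (List (String × String)))) : Prop := out = group_offers_by_market_py_alt offers
instance (offers : List (List (String × String))) (out : List (String × List (List (String × String)))) : Decidable (Spec_group_offers_by_market_py offers out) := by unfold Spec_group_offers_by_market_py; infer_instance

-- ===== CLAIM (what is proved, stated in full; the proofs are below) =====
def Claim_equal_group_offers_by_market_py : Prop := ∀ (offers : List (List (String × String))), Dom_group_offers_by_market_py offers → Spec_group_offers_by_market_py offers (group_offers_by_market_py offers)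

-- ===== LEMMAS AND PROOFS =====

-- A's bucket state, abbreviated
def pvDmk (a b c d : List (List (String × String))) : PySem.Dict String (List (List (String × String))) :=
  PySem.Dict.mk [("moneyline", a), ("spread", b), ("total", c), ("other", d)]

-- the body of A's fold, named for the proofs (definitionally the function in group_offers_by_market_py)
def pvStepA (b : PySem.Dict String (List (List (String × String)))) (off : List (String × String)) : PySem.Dict String (List (List (String × String))) :=
  let market : String := match pvGetMarket off with
    | some m => if m = "" then "other" else m
    | none => "other"
  let market := if b.contains market then market else "other"
  b.modify market [] (fun xs => xs ++ [off])

lemma pvGuard_eq (a b c d : List (List (String × String))) (k : String) :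
    (if (pvDmk a b c d).contains k then k else "other")
    = (if k ∈ ["moneyline", "spread", "total", "other"] then k else "other") := by
  simp [pvDmk, PySem.Dict.contains_mk]
  by_cases h1 : k = "moneyline" <;> by_cases h2 : k = "spread" <;>
    by_cases h3 : k = "total" <;> by_cases h4 : k = "other" <;> simp_all [eq_comm]

lemma pvClassify_cases (off : List (String × String)) :
    pvClassify off = "moneyline" ∨ pvClassify off = "spread" ∨
    pvClassify off = "total" ∨ pvClassify off = "other" := by
  unfold pvClassify
  set k : String := match pvGetMarket off with
    | some m => if m = "" then "other" else m
    | none => "other"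
  by_cases h : k ∈ ["moneyline", "spread", "total", "other"] <;> simp_all

lemma pvModify_m (a b c d : List (List (String × String))) (off : List (String × String)) :
    (pvDmk a b c d).modify "moneyline" [] (· ++ [off]) = pvDmk (a ++ [off]) b c d := by
  simp [pvDmk, PySem.Dict.modify, PySem.Dict.insert, PySem.Dict.getD, PySem.Dict.get?, PySem.Dict.contains]

lemma pvModify_s (a b c d : List (List (String × String))) (off : List (String × String)) :
    (pvDmk a b c d).modify "spread" [] (· ++ [off]) = pvDmk a (b ++ [off]) c d := by
  simp [pvDmk, PySem.Dict.modify, PySem.Dict.insert, PySem.Dict.getD, PySem.Dict.get?, PySem.Dict.contains]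

lemma pvModify_t (a b c d : List (List (String × String))) (off : List (String × String)) :
    (pvDmk a b c d).modify "total" [] (· ++ [off]) = pvDmk a b (c ++ [off]) d := by
  simp [pvDmk, PySem.Dict.modify, PySem.Dict.insert, PySem.Dict.getD, PySem.Dict.get?, PySem.Dict.contains]

lemma pvModify_o (a b c d : List (List (String × String))) (off : List (String × String)) :
    (pvDmk a b c d).modify "other" [] (· ++ [off]) = pvDmk a b c (d ++ [off]) := by
  simp [pvDmk, PySem.Dict.modify, PySem.Dict.insert, PySem.Dict.getD, PySem.Dict.get?, PySem.Dict.contains]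

lemma pvStepA_eq (a b c d : List (List (String × String))) (off : List (String × String)) :
    pvStepA (pvDmk a b c d) off
    = if pvClassify off = "moneyline" then pvDmk (a ++ [off]) b c d
      else if pvClassify off = "spread" then pvDmk a (b ++ [off]) c d
      else if pvClassify off = "total" then pvDmk a b (c ++ [off]) d
      else pvDmk a b c (d ++ [off]) := by
  simp only [pvStepA]
  generalize hk : (match pvGetMarket off with
    | some m => if m = "" then "other" else m
    | none => "other") = k
  rw [pvGuard_eq]
  have hcl : pvClassify off = if k ∈ ["moneyline", "spread", "total", "other"] then k else "other" := by
    simp only [pvClassify]; rw [hk]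
  rw [← hcl]
  rcases pvClassify_cases off with h | h | h | h <;> rw [h] <;>
    simp [pvModify_m, pvModify_s, pvModify_t, pvModify_o]

lemma pvFoldA_inv (l : List (List (String × String))) (a b c d : List (List (String × String))) :
    l.foldl pvStepA (pvDmk a b c d)
    = pvDmk (a ++ l.filter (fun off => pvClassify off == "moneyline"))
            (b ++ l.filter (fun off => pvClassify off == "spread"))
            (c ++ l.filter (fun off => pvClassify off == "total"))
            (d ++ l.filter (fun off => pvClassify off == "other")) := by
  induction l generalizing a b c d with
  | nil => simp
  | cons off tl ih =>
    rw [List.foldl_cons, pvStepA_eq]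
    rcases pvClassify_cases off with h | h | h | h <;>
      simp [h, ih]

-- ===== VERDICT (by name: the statement is the Claim_ definition above) =====
theorem group_offers_by_market_py_spec : Claim_equal_group_offers_by_market_py := by
  intro offers _
  unfold Spec_group_offers_by_market_py group_offers_by_market_py group_offers_by_market_py_alt
  show PySem.Dict.items (offers.foldl pvStepA _) = _
  have hof : (PySem.Dict.ofList [("moneyline", ([] : List (List (String × String)))), ("spread", []), ("total", []), ("other", [])])
      = pvDmk [] [] [] [] := by decide
  rw [hof, pvFoldA_inv]
  simp [pvDmk]
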